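-- pv_equiv track=rewrite | github.com/cosmicshuai/LeetCode_Practice | Leetcode_Discussion_Problems/find_approximate_median.py | getDigit
-- ===== SOURCE A (Python) =====
-- def getDigit(num):
--     lo = 0
--     hi = 64
--     #[0,1,...] find first k so that num <= 2 ** k
--     while lo < hi:
--         mid = (lo + hi) // 2
--         if num <= 2 ** mid:
--             hi = mid
--         else:
--             lo = mid + 1
--     return lo
-- ===== SOURCE B (Python) =====
-- def getDigit(num):
--     k = 0
--     while k < 64 and num > 2 ** k:
--         k += 1
--     return k
-- ===== Notes on version B (the rewrite author's own statement) =====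
-- stated objective: simpler
-- what changed: Replaces the binary search over [0,64] with a linear upward scan that increments k while num still exceeds the k-th power of two, keeping the clamp at 64.
import Mathlib
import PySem

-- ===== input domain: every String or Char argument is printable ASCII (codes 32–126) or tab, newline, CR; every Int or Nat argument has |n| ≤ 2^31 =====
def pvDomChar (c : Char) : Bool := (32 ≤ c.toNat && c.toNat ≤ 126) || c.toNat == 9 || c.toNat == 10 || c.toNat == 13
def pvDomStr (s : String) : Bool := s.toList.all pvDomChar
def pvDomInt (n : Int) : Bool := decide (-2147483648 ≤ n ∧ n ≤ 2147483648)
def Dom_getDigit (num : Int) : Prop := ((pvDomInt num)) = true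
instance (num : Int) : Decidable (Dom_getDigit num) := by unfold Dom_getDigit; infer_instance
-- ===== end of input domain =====

-- B replaces A's binary search over [0,64] with a linear upward scan of k (objective: simpler).

-- ===== PORT A =====
-- while lo < hi: mid = (lo+hi)//2; if num <= 2**mid: hi = mid else lo = mid+1
-- 2¹**mid uses mid.toNat: exact since lo starts at 0, so mid ≥ 0 throughout.
def getDigitLoop (num lo hi : Int) : Int :=
  if h : lo < hi then
    let mid := PySem.Int.floordiv (lo + hi) 2
    if num ≤ 2 ^ mid.toNat then getDigitLoop num lo mid
    else getDigitLoop num (mid + 1) hi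
  else lo
termination_by (hi - lo).toNat
decreasing_by
  · have _hb := PySem.Int.floordiv_two_mid_bounds (lo := lo) (hi := hi) (by omega)
    have : PySem.Int.floordiv (lo + hi) 2 < hi := by
      rw [PySem.Int.floordiv_lt_iff_lt_mul (by norm_num)]; omega
    omega
  · have hb := PySem.Int.floordiv_two_mid_bounds (lo := lo) (hi := hi) (by omega)
    omega

def getDigit (num : Int) : Int := getDigitLoop num 0 64

-- ===== PORT B =====
-- k = 0; while k < 64 and num > 2**k: k += 1; return k   (k ≥ 0 always, so 2**k = 2^k.toNat exactly)
def getDigitAltLoop (num k : Int) : Int :=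
  if h : k < 64 ∧ 2 ^ k.toNat < num then getDigitAltLoop num (k + 1) else k
termination_by (64 - k).toNat
decreasing_by omega

def getDigit_alt (num : Int) : Int := getDigitAltLoop num 0

-- ===== PRECONDITION & SPEC =====
def Spec_getDigit (num : Int) (out : Int) : Prop := out = getDigit_alt num
instance (num : Int) (out : Int) : Decidable (Spec_getDigit num out) := by unfold Spec_getDigit; infer_instance

-- ===== CLAIM (what is proved, stated in full; the proofs are below) =====
def Claim_equal_getDigit : Prop := ∀ (num : Int), Dom_getDigit num → Spec_getDigit num (getDigit num)

-- ===== LEMMAS AND PROOFS =====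

-- The characterization both loops satisfy: r is the least k in [0,64] with num ≤ 2^k (64 if none).
def pvGood (num r : Int) : Prop :=
  0 ≤ r ∧ r ≤ 64 ∧ (∀ j : Int, 0 ≤ j → j < r → 2 ^ j.toNat < num) ∧ (r < 64 → num ≤ 2 ^ r.toNat)

theorem pvGood_unique (num r1 r2 : Int) (h1 : pvGood num r1) (h2 : pvGood num r2) : r1 = r2 := by
  obtain ⟨a1, b1, c1, d1⟩ := h1
  obtain ⟨a2, b2, c2, d2⟩ := h2
  by_contra hne
  rcases lt_or_gt_of_ne hne with h | h
  · have := c2 r1 a1 h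
    have := d1 (by omega)
    omega
  · have := c1 r2 a2 h
    have := d2 (by omega)
    omega

theorem pow_mono_int (a b : Int) (hab : a ≤ b) : (2:Int) ^ a.toNat ≤ 2 ^ b.toNat := by
  exact pow_le_pow_right₀ (by norm_num) (by omega)

theorem loopA_good (num : Int) : ∀ n (lo hi : Int), (hi - lo).toNat = n →
    0 ≤ lo → lo ≤ hi → hi ≤ 64 →
    (∀ j : Int, 0 ≤ j → j < lo → 2 ^ j.toNat < num) →
    (hi < 64 → num ≤ 2 ^ hi.toNat) →
    pvGood num (getDigitLoop num lo hi) := by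
  intro n
  induction n using Nat.strong_induction_on with
  | _ n ih =>
    intro lo hi hn h0 hlh h64 hbelow habove
    rw [getDigitLoop]
    split
    · next hlt =>
      have hb := PySem.Int.floordiv_two_mid_bounds (lo := lo) (hi := hi) (by omega)
      have hmidlt : PySem.Int.floordiv (lo + hi) 2 < hi := by
        rw [PySem.Int.floordiv_lt_iff_lt_mul (by norm_num)]; omega
      set mid := PySem.Int.floordiv (lo + hi) 2 with hmid
      show pvGood num (if num ≤ 2 ^ mid.toNat then getDigitLoop num lo mid else getDigitLoop num (mid + 1) hi)
      split
      · next hle =>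
        exact ih _ (by omega) lo mid rfl h0 hb.1 (by omega) hbelow (fun _ => hle)
      · next hgt =>
        push Not at hgt
        refine ih _ (by omega) (mid + 1) hi rfl (by omega) (by omega) h64 ?_ habove
        intro j hj0 hjlt
        by_cases hjlo : j < lo
        · exact hbelow j hj0 hjlo
        · have : (2:Int) ^ j.toNat ≤ 2 ^ mid.toNat := pow_mono_int j mid (by omega)
          omega
    · next hge =>
      have : lo = hi := by omega
      exact ⟨h0, by omega, hbelow, fun hlt => this ▸ habove (by omega)⟩

theorem loopB_good (num : Int) : ∀ n (k : Int), (64 - k).toNat = n →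
    0 ≤ k → k ≤ 64 →
    (∀ j : Int, 0 ≤ j → j < k → 2 ^ j.toNat < num) →
    pvGood num (getDigitAltLoop num k) := by
  intro n
  induction n using Nat.strong_induction_on with
  | _ n ih =>
    intro k hn h0 h64 hbelow
    rw [getDigitAltLoop]
    split
    · next hc =>
      refine ih _ (by omega) (k + 1) rfl (by omega) (by omega) ?_
      intro j hj0 hjlt
      by_cases hjk : j < k
      · exact hbelow j hj0 hjk
      · have : (2:Int) ^ j.toNat ≤ 2 ^ k.toNat := pow_mono_int j k (by omega)
        omega
    · next hc =>
      push Not at hc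
      refine ⟨h0, h64, hbelow, fun hlt => ?_⟩
      exact le_of_not_gt (by intro hgt; exact absurd (hc hlt) (by omega))

-- ===== VERDICT (by name: the statement is the Claim_ definition above) =====
theorem getDigit_spec : Claim_equal_getDigit := by
  intro num _
  unfold Spec_getDigit getDigit getDigit_alt
  exact pvGood_unique num _ _
    (loopA_good num _ 0 64 rfl (by norm_num) (by norm_num) (by norm_num)
      (by intro j h1 h2; omega) (by intro h; omega))
    (loopB_good num _ 0 rfl (by norm_num) (by norm_num) (by intro j h1 h2; omega))
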